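-- pv_equiv track=rewrite | github.com/aionescu/ubb | Y1S1/FP/Asg02/complex.py | get_int_substr
-- ===== SOURCE A (Python) =====
-- def get_int_substr(s):
--   ss = ""
--   l = 0
--
--   for c in s:
--     if not c in "0123456789":
--       return ss, s[l:]
--
--     ss += c
--     l += 1
--
--   return ss, s[l:]
-- ===== SOURCE B (Python) =====
-- def get_int_substr(s):
--   rest = s.lstrip("0123456789")
--   return s[:len(s) - len(rest)], rest
-- ===== Notes on version B (the rewrite author's own statement) =====
-- stated objective: idiomatic
-- what changed: Replaces the explicit char-by-char loop with two accumulators by a single str.lstrip call over the ten ASCII digit characters, recovering the prefix by length arithmetic.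
import Mathlib
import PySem

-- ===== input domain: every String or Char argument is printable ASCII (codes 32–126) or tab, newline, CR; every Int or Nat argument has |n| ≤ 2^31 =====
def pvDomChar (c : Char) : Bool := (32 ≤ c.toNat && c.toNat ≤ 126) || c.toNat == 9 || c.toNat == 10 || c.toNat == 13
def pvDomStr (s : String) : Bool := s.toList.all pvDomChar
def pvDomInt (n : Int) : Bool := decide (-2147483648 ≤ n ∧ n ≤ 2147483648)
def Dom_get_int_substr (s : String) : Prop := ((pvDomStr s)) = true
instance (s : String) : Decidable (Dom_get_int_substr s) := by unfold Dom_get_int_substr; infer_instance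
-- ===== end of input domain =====

-- B replaces A's explicit char loop by a single lstrip("0123456789") call plus length arithmetic (idiomatic; same cost).


-- ===== PORT A =====
-- the membership test 'c in "0123456789"' (single char ⇒ char membership)
def pvIsDigit (c : Char) : Bool := "0123456789".toList.contains c

-- the for-loop of A: remaining chars, accumulator ss, counter l; s[l:] via PySem.List.slice
def get_int_substr_go (full : List Char) (ss : List Char) (l : Int) : List Char → List Char × List Char
  | [] => (ss, PySem.List.slice full (some l) none)
  | c :: rest =>
    if !pvIsDigit c then (ss, PySem.List.slice full (some l) none)
    else get_int_substr_go full (ss ++ [c]) (l + 1) rest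

def get_int_substr (s : String) : String × String :=
  let r := get_int_substr_go s.toList [] 0 s.toList
  (String.ofList r.1, String.ofList r.2)

-- ===== PORT B =====
-- s.lstrip("0123456789") is not in PySem; ported by hand, exact: drop leading chars belonging to the set
def get_int_substr_alt (s : String) : String × String :=
  let cs := s.toList
  let rest := cs.dropWhile pvIsDigit
  (String.ofList (cs.take (cs.length - rest.length)), String.ofList rest)

-- ===== PRECONDITION & SPEC =====
def Spec_get_int_substr (s : String) (out : String × String) : Prop := out = get_int_substr_alt s
instance (s : String) (out : String × String) : Decidable (Spec_get_int_substr s out) := by unfold Spec_get_int_substr; infer_instance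

-- ===== CLAIM (what is proved, stated in full; the proofs are below) =====
def Claim_equal_get_int_substr : Prop := ∀ (s : String), Dom_get_int_substr s → Spec_get_int_substr s (get_int_substr s)

-- ===== LEMMAS AND PROOFS =====

theorem get_int_substr_go_spec (rest pre : List Char) :
    get_int_substr_go (pre ++ rest) pre (pre.length : Int) rest
      = (pre ++ rest.takeWhile pvIsDigit, rest.dropWhile pvIsDigit) := by
  induction rest generalizing pre with
  | nil =>
    simp [get_int_substr_go, PySem.List.slice_from_natCast]
  | cons c t ih =>
    by_cases h : pvIsDigit c
    · have step := ih (pre ++ [c])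
      simp only [get_int_substr_go, h, Bool.not_true, Bool.false_eq_true, if_false]
      rw [show pre ++ c :: t = (pre ++ [c]) ++ t by simp,
          show (pre.length : Int) + 1 = (((pre ++ [c]).length : Nat) : Int) by simp]
      rw [step]
      simp [h]
    · simp [get_int_substr_go, h, PySem.List.slice_from_natCast]

theorem get_int_substr_spec : Claim_equal_get_int_substr := by
  intro s _
  unfold Spec_get_int_substr get_int_substr get_int_substr_alt
  have h := get_int_substr_go_spec s.toList []
  simp only [List.nil_append, List.length_nil, Nat.cast_zero] at h
  rw [h]
  have hsplit : s.toList.takeWhile pvIsDigit ++ s.toList.dropWhile pvIsDigit = s.toList :=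
    List.takeWhile_append_dropWhile
  have hlen : s.toList.length - (s.toList.dropWhile pvIsDigit).length
      = (s.toList.takeWhile pvIsDigit).length := by
    have := congrArg List.length hsplit
    simp only [List.length_append] at this
    omega
  simp only [hlen]
  rw [show s.toList.take (s.toList.takeWhile pvIsDigit).length = s.toList.takeWhile pvIsDigit by
    obtain ⟨t, ht⟩ := List.takeWhile_prefix (p := pvIsDigit) (l := s.toList)
    set tw := s.toList.takeWhile pvIsDigit with htw
    rw [← ht, List.take_left]]
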